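-- pv_equiv track=rewrite | github.com/fjkz/junkcode | leetcode/MaxCounters.py | solution
-- ===== SOURCE A (Python) =====
-- def solution(N, A):
--     base = 0
--     max_val = 0
--     counter = [0] * N
--     for n in A:
--         if n == N + 1:
--             base = max_val
--             continue
--         counter[n - 1] = max(base, counter[n - 1]) + 1
--         max_val = max(max_val, counter[n - 1])
--     return [max(base, n) for n in counter]
-- ===== SOURCE B (Python) =====
-- def split_resets(N, A):
--     # Stage 1: cut A into the segments of increment-ops separated by max-counter ops.
--     parts = []
--     seg = []
--     for n in A:
--         if n == N + 1:
--             parts = parts + [seg]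
--             seg = []
--         else:
--             seg = seg + [n]
--     return parts, seg
--
-- def list_max0(xs):
--     m = 0
--     for x in xs:
--         m = max(m, x)
--     return m
--
-- def solution(N, A):
--     # Stage 2: replay one closed segment at a time; after each closed segment the
--     # counters are levelled to their running maximum; the trailing open segment is
--     # applied last and the counters are returned as they stand.
--     parts, last = split_resets(N, A)
--     counter = [0] * N
--     for seg in parts:
--         for n in seg:
--             counter[n - 1] += 1
--         counter = [list_max0(counter)] * N
--     for n in last:
--         counter[n - 1] += 1
--     return counter
-- ===== Notes on version B (the rewrite author's own statement) =====
-- stated objective: alternative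
-- what changed: B first splits A into the segments between max-counter operations and then replays segment by segment, levelling the whole counter list to its recomputed maximum after each closed segment, instead of A's single pass with a lazy 'base' floor reconciled by a final max-map; no running max_val is kept, it is recomputed from the list.
import Mathlib
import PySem

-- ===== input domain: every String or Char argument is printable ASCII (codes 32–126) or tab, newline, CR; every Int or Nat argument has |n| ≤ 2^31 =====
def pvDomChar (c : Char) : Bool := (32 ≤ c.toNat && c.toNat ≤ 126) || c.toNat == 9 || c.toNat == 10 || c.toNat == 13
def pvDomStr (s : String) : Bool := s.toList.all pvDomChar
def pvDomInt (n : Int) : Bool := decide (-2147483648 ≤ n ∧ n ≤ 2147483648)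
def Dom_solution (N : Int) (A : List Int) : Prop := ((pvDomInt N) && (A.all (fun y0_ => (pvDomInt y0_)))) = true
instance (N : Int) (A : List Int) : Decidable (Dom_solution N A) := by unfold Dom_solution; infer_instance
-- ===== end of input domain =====

-- B replaces A's lazy-base single pass (reconciled by a final max-map) with a staged decomposition:
-- split A into segments between max-counter ops, then replay segment by segment, levelling the
-- counter list to its recomputed maximum after each closed segment; alternative, not claimed faster.
-- Pre_ excludes exactly the inputs where the Python raises IndexError.


-- ===== PORT A =====
-- state: (base, max_val, counter)
def stepA (N : Int) (s : Int × Int × List Int) (n : Int) : Int × Int × List Int :=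
  if n = N + 1 then (s.2.1, s.2.1, s.2.2)
  else
    let counter := PySem.List.pySetD s.2.2 (n - 1)
      (max s.1 (PySem.List.pyGetD s.2.2 (n - 1) 0) + 1)
    (s.1, max s.2.1 (PySem.List.pyGetD counter (n - 1) 0), counter)

def solution (N : Int) (A : List Int) : List Int :=
  let s := A.foldl (stepA N) (0, 0, List.replicate N.toNat 0)
  s.2.2.map (fun n => max s.1 n)

-- ===== PORT B =====
-- stage 1: split A into closed segments between resets, plus the trailing open segment
def pvSplitStep (N : Int) (s : List (List Int) × List Int) (n : Int) : List (List Int) × List Int :=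
  if n = N + 1 then (s.1 ++ [s.2], []) else (s.1, s.2 ++ [n])

def pvSplitResets (N : Int) (A : List Int) : List (List Int) × List Int :=
  A.foldl (pvSplitStep N) ([], [])

-- counter[n-1] += 1
def pvIncStep (c : List Int) (n : Int) : List Int :=
  PySem.List.pySetD c (n - 1) (PySem.List.pyGetD c (n - 1) 0 + 1)

def pvApplyIncs (c : List Int) (seg : List Int) : List Int := seg.foldl pvIncStep c

-- list_max0: running max starting from 0
def pvListMax0 (xs : List Int) : Int := xs.foldl max 0

-- stage 2: replay the closed segments, levelling after each; then the trailing segment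
def solution_alt (N : Int) (A : List Int) : List Int :=
  let r := pvSplitResets N A
  pvApplyIncs
    (r.1.foldl (fun c seg => List.replicate N.toNat (pvListMax0 (pvApplyIncs c seg)))
      (List.replicate N.toNat 0))
    r.2

-- ===== PRECONDITION & SPEC =====
-- Exactly the inputs on which the Python A returns: every element is the max-op N+1 or a valid
-- (possibly negative, Python-wraparound) index into the length-max(N,0) counter list.
def Pre_solution (N : Int) (A : List Int) : Prop :=
  ∀ n ∈ A, n = N + 1 ∨ (-(N.toNat : Int) ≤ n - 1 ∧ n - 1 < (N.toNat : Int))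
instance (N : Int) (A : List Int) : Decidable (Pre_solution N A) := by
  unfold Pre_solution; infer_instance
def pvWitness_solution : Int × List Int := (3, [1, 2, 4, 3, 0, -2])

def Spec_solution (N : Int) (A : List Int) (out : List Int) : Prop := out = solution_alt N A
instance (N : Int) (A : List Int) (out : List Int) : Decidable (Spec_solution N A out) := by unfold Spec_solution; infer_instance

-- ===== CLAIM (what is proved, stated in full; the proofs are below) =====
def Claim_equal_solution : Prop := ∀ (N : Int) (A : List Int), Dom_solution N A → Pre_solution N A → Spec_solution N A (solution N A)

-- ===== LEMMAS AND PROOFS =====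

-- proof-side eager one-pass simulation, the bridge between the two ports
def eagerStep (N : Int) (s : List Int × Int) (n : Int) : List Int × Int :=
  if n = N + 1 then (List.replicate N.toNat s.2, s.2)
  else
    let counter := PySem.List.pySetD s.1 (n - 1) (PySem.List.pyGetD s.1 (n - 1) 0 + 1)
    (counter, max s.2 (PySem.List.pyGetD counter (n - 1) 0))

theorem pyGetD_congr_default {α : Type} (xs : List α) (i : Int) (d d' : α)
    (h : PySem.Raise.InRange xs.length i) :
    PySem.List.pyGetD xs i d = PySem.List.pyGetD xs i d' := by
  cases hx : PySem.List.pyGet? xs i with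
  | none => exact absurd h ((PySem.List.pyGet?_eq_none_iff xs i).mp hx)
  | some x => simp [PySem.List.pyGetD, hx]

theorem pySetD_map {α β : Type} (f : α → β) (xs : List α) (i : Int) (v : α) :
    PySem.List.pySetD (xs.map f) i (f v) = (PySem.List.pySetD xs i v).map f := by
  simp only [PySem.List.pySetD, PySem.List.pySet?, List.length_map]
  cases PySem.List.pyIdx? xs.length i with
  | none => simp
  | some k => simp [List.map_set]

theorem pyGetD_pySetD_self {α : Type} (xs : List α) (i : Int) (v d : α)
    (h : PySem.Raise.InRange xs.length i) :
    PySem.List.pyGetD (PySem.List.pySetD xs i v) i d = v := by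
  have hir : -(xs.length : Int) ≤ i ∧ i < (xs.length : Int) := h
  simp only [PySem.List.pySetD, PySem.List.pySet?, PySem.List.pyGetD,
    PySem.List.pyGet?, PySem.List.pyIdx?]
  by_cases h0 : 0 ≤ i
  · have hk : i.toNat < xs.length := by omega
    simp [h0, hir.2, List.length_set, hk]
  · have hk : xs.length - (-i).toNat < xs.length := by omega
    simp [h0, hir.1, List.length_set, hk]

theorem length_pySetD' {α : Type} (xs : List α) (i : Int) (v : α) :
    (PySem.List.pySetD xs i v).length = xs.length := by
  simp only [PySem.List.pySetD, PySem.List.pySet?]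
  cases PySem.List.pyIdx? xs.length i with
  | none => simp
  | some k => simp

theorem mem_pySetD {α : Type} {xs : List α} {i : Int} {v c : α}
    (h : c ∈ PySem.List.pySetD xs i v) : c ∈ xs ∨ c = v := by
  simp only [PySem.List.pySetD, PySem.List.pySet?] at h
  cases hk : PySem.List.pyIdx? xs.length i with
  | none => simp [hk] at h; exact Or.inl h
  | some k =>
    simp [hk] at h
    exact List.mem_or_eq_of_mem_set h

-- resolve a valid (possibly negative) python index to a Nat index
theorem idx_resolve {α : Type} (xs : List α) (i : Int)
    (h : PySem.Raise.InRange xs.length i) :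
    ∃ k : Nat, k < xs.length ∧ (∀ v, PySem.List.pySetD xs i v = xs.set k v) ∧
      (∀ d : α, PySem.List.pyGetD xs i d = xs.getD k d) := by
  have hir : -(xs.length : Int) ≤ i ∧ i < (xs.length : Int) := h
  by_cases h0 : 0 ≤ i
  · refine ⟨i.toNat, by omega, ?_, ?_⟩
    · intro v
      simp only [PySem.List.pySetD, PySem.List.pySet?, PySem.List.pyIdx?]
      have hk : i.toNat < xs.length := by omega
      simp [h0, hir.2]
    · intro d
      simp only [PySem.List.pyGetD, PySem.List.pyGet?, PySem.List.pyIdx?]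
      have hk : i.toNat < xs.length := by omega
      simp [h0, hir.2, List.getD, hk]
  · refine ⟨xs.length - (-i).toNat, by omega, ?_, ?_⟩
    · intro v
      simp only [PySem.List.pySetD, PySem.List.pySet?, PySem.List.pyIdx?]
      simp [h0, hir.1]
    · intro d
      simp only [PySem.List.pyGetD, PySem.List.pyGet?, PySem.List.pyIdx?]
      have hk : xs.length - (-i).toNat < xs.length := by omega
      simp [h0, hir.1, List.getD, hk]

-- running-max algebra
theorem foldl_max_pull (xs : List Int) : ∀ (a b : Int),
    xs.foldl max (max a b) = max (xs.foldl max a) b := by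
  induction xs with
  | nil => intro a b; rfl
  | cons x t ih =>
    intro a b
    simp only [List.foldl_cons]
    rw [show max (max a b) x = max (max a x) b by
      rw [max_assoc, max_comm b x, ← max_assoc]]
    exact ih (max a x) b

theorem foldl_max_set (xs : List Int) : ∀ (k : Nat) (a v : Int), k < xs.length →
    xs.getD k 0 ≤ v → (xs.set k v).foldl max a = max (xs.foldl max a) v := by
  induction xs with
  | nil => intro k a v hk _; exact absurd hk (by simp)
  | cons x t ih =>
    intro k a v hk hle
    cases k with
    | zero =>
      simp only [List.set_cons_zero, List.foldl_cons, List.getD_cons_zero] at *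
      rw [foldl_max_pull, foldl_max_pull, max_assoc, max_comm x v, max_eq_left hle]
    | succ k =>
      simp only [List.set_cons_succ, List.foldl_cons, List.getD_cons_succ] at *
      exact ih k (max a x) v (by simp at hk; omega) hle

theorem foldl_max_replicate_self (m : Nat) : ∀ v : Int,
    (List.replicate m v).foldl max v = v := by
  induction m with
  | zero => intro v; rfl
  | succ m ih => intro v; simp [List.replicate_succ, List.foldl_cons, ih]

theorem listMax0_replicate (m : Nat) (v : Int) (hm : m ≠ 0) (hv : 0 ≤ v) :
    pvListMax0 (List.replicate m v) = v := by
  obtain ⟨m', rfl⟩ := Nat.exists_eq_succ_of_ne_zero hm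
  simp only [pvListMax0, List.replicate_succ, List.foldl_cons, max_eq_right hv]
  exact foldl_max_replicate_self m' v

theorem listMax0_nonneg (xs : List Int) : 0 ≤ pvListMax0 xs :=
  (PySem.List.le_foldl_max xs 0).1

theorem length_applyIncs (seg : List Int) : ∀ c : List Int,
    (pvApplyIncs c seg).length = c.length := by
  induction seg with
  | nil => intro c; rfl
  | cons n t ih =>
    intro c
    simp only [pvApplyIncs, List.foldl_cons] at *
    rw [ih, pvIncStep, length_pySetD']

-- one eager increment step, when max_val is the list's running max
theorem eagerStep_inc (N : Int) (x : List Int) (n : Int) (hn : n ≠ N + 1)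
    (hr : PySem.Raise.InRange x.length (n - 1)) :
    eagerStep N (x, pvListMax0 x) n = (pvIncStep x n, pvListMax0 (pvIncStep x n)) := by
  obtain ⟨k, hk, hset, hget⟩ := idx_resolve x (n - 1) hr
  have hrr : PySem.Raise.InRange (pvIncStep x n).length (n - 1) := by
    rw [pvIncStep, length_pySetD']; exact hr
  have hg : PySem.List.pyGetD (pvIncStep x n) (n - 1) 0
      = PySem.List.pyGetD x (n - 1) 0 + 1 :=
    pyGetD_pySetD_self x (n - 1) _ 0 hr
  simp only [eagerStep, if_neg hn]
  rw [show PySem.List.pySetD x (n - 1) (PySem.List.pyGetD x (n - 1) 0 + 1) = pvIncStep x n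
    from rfl]
  refine Prod.ext rfl ?_
  simp only [hg]
  rw [show (pvIncStep x n) = x.set k (PySem.List.pyGetD x (n - 1) 0 + 1) from hset _]
  rw [pvListMax0, pvListMax0,
    foldl_max_set x k 0 _ hk (by rw [hget 0]; rw [hget 0] at *; omega)]

-- splitting from an already-accumulated list of closed parts just prepends them
theorem split_shift (N : Int) (A : List Int) : ∀ (ps : List (List Int)) (s : List Int),
    A.foldl (pvSplitStep N) (ps, s)
      = (ps ++ (A.foldl (pvSplitStep N) ([], s)).1, (A.foldl (pvSplitStep N) ([], s)).2) := by
  induction A with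
  | nil => intro ps s; simp
  | cons n A ih =>
    intro ps s
    simp only [List.foldl_cons, pvSplitStep]
    by_cases hn : n = N + 1
    · simp only [if_pos hn, List.nil_append]
      rw [ih (ps ++ [s]) [], ih [s] []]
      simp
    · simp only [if_neg hn, List.nil_append]
      exact ih ps (s ++ [n])

-- main bridge: B's staged replay equals the eager one-pass fold
theorem segments_eq_eager (N : Int) (A : List Int)
    (hA : ∀ n ∈ A, n = N + 1 ∨ (-(N.toNat : Int) ≤ n - 1 ∧ n - 1 < (N.toNat : Int))) :
    ∀ (c pending : List Int), c.length = N.toNat →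
    pvApplyIncs
      ((A.foldl (pvSplitStep N) ([], pending)).1.foldl
        (fun c seg => List.replicate N.toNat (pvListMax0 (pvApplyIncs c seg))) c)
      (A.foldl (pvSplitStep N) ([], pending)).2
    = (A.foldl (eagerStep N)
        (pvApplyIncs c pending, pvListMax0 (pvApplyIncs c pending))).1 := by
  induction A with
  | nil => intro c pending _; rfl
  | cons n A ih =>
    intro c pending hc
    have hn := hA n (List.mem_cons_self)
    have hA' := fun m hm => hA m (List.mem_cons_of_mem n hm)
    have hacl : (pvApplyIncs c pending).length = N.toNat := by
      rw [length_applyIncs]; exact hc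
    simp only [List.foldl_cons]
    by_cases hmax : n = N + 1
    · -- the pending segment closes; B levels, the eager fold resets
      set c' : List Int := List.replicate N.toNat (pvListMax0 (pvApplyIncs c pending)) with hc'
      have hstepS : pvSplitStep N ([], pending) n = ([pending], []) := by
        simp [pvSplitStep, hmax]
      have hstepE : eagerStep N (pvApplyIncs c pending, pvListMax0 (pvApplyIncs c pending)) n
          = (c', pvListMax0 (pvApplyIncs c pending)) := by
        simp [eagerStep, hmax, hc']
      rw [hstepS, hstepE, split_shift N A [pending] []]
      simp only [List.foldl_cons, List.cons_append, List.nil_append]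
      have hmv : pvListMax0 c' = pvListMax0 (pvApplyIncs c pending) := by
        by_cases h0 : N.toNat = 0
        · have : pvApplyIncs c pending = [] := List.eq_nil_of_length_eq_zero (by omega)
          rw [hc', h0, this]; rfl
        · exact listMax0_replicate _ _ h0 (listMax0_nonneg _)
      rw [← hc', ← hmv]
      have h2 := ih hA' c' [] (by simp [hc'])
      simp only [pvApplyIncs, List.foldl_nil] at h2 ⊢
      exact h2
    · -- an increment; it joins the pending segment
      obtain ⟨hlo, hhi⟩ := hn.resolve_left hmax
      have hr : PySem.Raise.InRange (pvApplyIncs c pending).length (n - 1) := by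
        rw [hacl]; exact ⟨hlo, hhi⟩
      have hstepS : pvSplitStep N ([], pending) n = ([], pending ++ [n]) := by
        simp [pvSplitStep, hmax]
      have happ : pvApplyIncs c (pending ++ [n]) = pvIncStep (pvApplyIncs c pending) n := by
        simp [pvApplyIncs, List.foldl_append]
      rw [hstepS, eagerStep_inc N _ n hmax hr, ← happ]
      exact ih hA' c (pending ++ [n]) hc

-- A's lazy state maps onto the eager state: counter-with-base-applied, same max_val
theorem inv_foldl (N : Int) (A : List Int)
    (hA : ∀ n ∈ A, n = N + 1 ∨ (-(N.toNat : Int) ≤ n - 1 ∧ n - 1 < (N.toNat : Int))) :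
    ∀ (base mv : Int) (ca : List Int),
      ca.length = N.toNat → 0 ≤ base → base ≤ mv → (∀ c ∈ ca, c ≤ mv) →
      (A.foldl (eagerStep N) (ca.map (fun c => max base c), mv)).1 =
        (let s := A.foldl (stepA N) (base, mv, ca); s.2.2.map (fun n => max s.1 n)) := by
  induction A with
  | nil => intro base mv ca _ _ _ _; rfl
  | cons n A ih =>
    intro base mv ca hlen hb0 hbm hcm
    have hn := hA n (List.mem_cons_self)
    have hA' := fun m hm => hA m (List.mem_cons_of_mem n hm)
    simp only [List.foldl_cons]
    by_cases hmax : n = N + 1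
    · -- reset step
      have hrep : List.replicate N.toNat mv = ca.map (fun c => max mv c) := by
        symm
        apply List.eq_replicate_iff.mpr
        refine ⟨by simp [hlen], ?_⟩
        intro b hb
        obtain ⟨c, hc, rfl⟩ := List.mem_map.mp hb
        exact max_eq_left (hcm c hc)
      rw [show eagerStep N (ca.map (fun c => max base c), mv) n = (List.replicate N.toNat mv, mv)
          by simp [eagerStep, hmax],
        show stepA N (base, mv, ca) n = (mv, mv, ca) by simp [stepA, hmax], hrep]
      exact ih hA' mv mv ca hlen (le_trans hb0 hbm) le_rfl hcm
    · -- increment step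
      obtain ⟨hlo, hhi⟩ := hn.resolve_left hmax
      have hir : PySem.Raise.InRange ca.length (n - 1) := by
        rw [hlen]; exact ⟨hlo, hhi⟩
      have hirm : PySem.Raise.InRange (ca.map (fun c => max base c)).length (n - 1) := by
        simpa using hir
      set g := PySem.List.pyGetD ca (n - 1) 0 with hg
      set v := max base g + 1 with hv
      have hbv : base < v := by
        rw [hv]; exact lt_of_le_of_lt (le_max_left _ _) (lt_add_one _)
      have hgm : PySem.List.pyGetD (ca.map (fun c => max base c)) (n - 1) 0 = max base g := by
        rw [pyGetD_congr_default _ _ 0 (max base 0) hirm]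
        exact PySem.List.pyGetD_map (fun c => max base c) ca (n - 1) 0
      have hsetm : PySem.List.pySetD (ca.map (fun c => max base c)) (n - 1) v
          = (PySem.List.pySetD ca (n - 1) v).map (fun c => max base c) := by
        have h2 := pySetD_map (fun c => max base c) ca (n - 1) v
        rwa [max_eq_right (le_of_lt hbv)] at h2
      have hgetA : PySem.List.pyGetD (PySem.List.pySetD ca (n - 1) v) (n - 1) 0 = v :=
        pyGetD_pySetD_self ca (n - 1) v 0 hir
      have hirs : PySem.Raise.InRange (PySem.List.pySetD ca (n - 1) v).length (n - 1) := by
        rw [length_pySetD']; exact hir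
      have hgetB : PySem.List.pyGetD
          ((PySem.List.pySetD ca (n - 1) v).map (fun c => max base c)) (n - 1) 0 = v := by
        rw [pyGetD_congr_default _ _ 0 (max base 0) (by simpa using hirs),
          PySem.List.pyGetD_map (fun c => max base c) _ (n - 1) 0, hgetA]
        exact max_eq_right (le_of_lt hbv)
      have hstepA : stepA N (base, mv, ca) n
          = (base, max mv v, PySem.List.pySetD ca (n - 1) v) := by
        simp only [stepA, if_neg hmax, ← hg, ← hv, hgetA]
      have hstepB : eagerStep N (ca.map (fun c => max base c), mv) n
          = ((PySem.List.pySetD ca (n - 1) v).map (fun c => max base c), max mv v) := by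
        simp only [eagerStep, if_neg hmax, hgm, ← hv, hsetm, hgetB]
      rw [hstepA, hstepB]
      apply ih hA' base (max mv v) (PySem.List.pySetD ca (n - 1) v)
      · rw [length_pySetD', hlen]
      · exact hb0
      · exact le_trans hbm (le_max_left _ _)
      · intro c hc
        rcases mem_pySetD hc with h | rfl
        · exact le_trans (hcm c h) (le_max_left _ _)
        · exact le_max_right _ _

theorem listMax0_replicate_zero (m : Nat) : pvListMax0 (List.replicate m 0) = 0 := by
  induction m with
  | zero => rfl
  | succ m ih => simpa [pvListMax0, List.replicate_succ] using ih

-- ===== VERDICT (by name: the statement is the Claim_ definition above) =====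
theorem solution_spec : Claim_equal_solution := by
  intro N A _ hpre
  unfold Spec_solution
  have hAeq : solution N A = (A.foldl (eagerStep N) (List.replicate N.toNat 0, 0)).1 := by
    have h := inv_foldl N A hpre 0 0 (List.replicate N.toNat 0) (by simp) le_rfl le_rfl
      (by intro c hc; rw [List.eq_of_mem_replicate hc])
    have hmap : (List.replicate N.toNat (0 : Int)).map (fun c => max 0 c)
        = List.replicate N.toNat 0 := by simp
    rw [hmap] at h
    exact h.symm
  have hBeq := segments_eq_eager N A hpre (List.replicate N.toNat 0) [] (by simp)
  simp only [pvApplyIncs, List.foldl_nil, listMax0_replicate_zero] at hBeq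
  rw [hAeq, solution_alt, pvSplitResets, ← hBeq]
  rfl
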